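-- pv_equiv track=rewrite | github.com/ElyashivN/alta-ai-call-center | app/services/constraints_nlp_service.py | _extract_preferred_days
-- ===== SOURCE A (Python) =====
-- from typing import Optional, List
--
-- _BASE_DAYS = ["mon", "tue", "wed", "thu", "fri", "sat", "sun"]
--
-- _DAY_CODE = {
--     "mon": "MON",
--     "tue": "TUE",
--     "wed": "WED",
--     "thu": "THU",
--     "fri": "FRI",
--     "sat": "SAT",
--     "sun": "SUN",
-- }
--
-- _FULL_NAME_TO_BASE = {
--     "monday": "mon",
--     "tuesday": "tue",
--     "wednesday": "wed",
--     "thursday": "thu",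
--     "friday": "fri",
--     "saturday": "sat",
--     "sunday": "sun",
-- }
--
-- def _extract_preferred_days(text_lower: str) -> List[str]:
--     """
--     Handle:
--       - explicit days like "Tuesday", "Thu"
--       - ranges like "Mon-Wed", "Tue–Thu" (inclusive)
--     """
--     normalized = (
--         text_lower.replace("–", "-")
--         .replace("—", "-")
--         .replace(" to ", "-")
--     )
--
--     found: set[str] = set()
--
--     # 1) Ranges like "tue-thu"
--     for i, start_base in enumerate(_BASE_DAYS):
--         for j, end_base in enumerate(_BASE_DAYS):
--             if i > j:
--                 continue
--             pattern = f"{start_base}-{end_base}"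
--             if pattern in normalized:
--                 for k in range(i, j + 1):
--                     base = _BASE_DAYS[k]
--                     found.add(_DAY_CODE[base])
--
--     # 2) Full names: "tuesday", "friday"
--     for full_name, base in _FULL_NAME_TO_BASE.items():
--         if full_name in normalized:
--             found.add(_DAY_CODE[base])
--
--     # 3) Abbreviations "mon", "tue", etc.
--     for base in _BASE_DAYS:
--         if base in normalized:
--             found.add(_DAY_CODE[base])
--
--     return sorted(found) if found else []
-- ===== SOURCE B (Python) =====
-- from typing import Optional, List
--
-- _BASE_DAYS = ["mon", "tue", "wed", "thu", "fri", "sat", "sun"]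
--
-- _DAY_CODE = {
--     "mon": "MON",
--     "tue": "TUE",
--     "wed": "WED",
--     "thu": "THU",
--     "fri": "FRI",
--     "sat": "SAT",
--     "sun": "SUN",
-- }
--
-- _BASE_INDEX = {b: i for i, b in enumerate(_BASE_DAYS)}
--
--
-- def _extract_preferred_days(text_lower: str) -> List[str]:
--     # Single left-to-right scan of the text: at each position recognise a day
--     # token (3 chars) via one dict lookup; if it is followed by "-<day>" with a
--     # non-descending day, add the whole inclusive range.  Full day names need no
--     # separate pass: each contains its abbreviation as a prefix.
--     normalized = (
--         text_lower.replace("–", "-")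
--         .replace("—", "-")
--         .replace(" to ", "-")
--     )
--     n = len(normalized)
--     found: set[str] = set()
--     for p in range(n):
--         i = _BASE_INDEX.get(normalized[p:p + 3])
--         if i is None:
--             continue
--         found.add(_DAY_CODE[_BASE_DAYS[i]])
--         if p + 7 <= n and normalized[p + 3] == "-":
--             j = _BASE_INDEX.get(normalized[p + 4:p + 7])
--             if j is not None and i <= j:
--                 for k in range(i, j + 1):
--                     found.add(_DAY_CODE[_BASE_DAYS[k]])
--     return sorted(found)
-- ===== Notes on version B (the rewrite author's own statement) =====
-- stated objective: alternative
-- what changed: Instead of testing 56 precomputed patterns for substring membership, B makes one left-to-right scan of the text itself, recognising a day token at each position by a single dict lookup of the 3-char window and extending it to an inclusive range when a dash and a second, non-descending day follow; the redundant full-name pass disappears because each full name starts with its abbreviation.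
import Mathlib
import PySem

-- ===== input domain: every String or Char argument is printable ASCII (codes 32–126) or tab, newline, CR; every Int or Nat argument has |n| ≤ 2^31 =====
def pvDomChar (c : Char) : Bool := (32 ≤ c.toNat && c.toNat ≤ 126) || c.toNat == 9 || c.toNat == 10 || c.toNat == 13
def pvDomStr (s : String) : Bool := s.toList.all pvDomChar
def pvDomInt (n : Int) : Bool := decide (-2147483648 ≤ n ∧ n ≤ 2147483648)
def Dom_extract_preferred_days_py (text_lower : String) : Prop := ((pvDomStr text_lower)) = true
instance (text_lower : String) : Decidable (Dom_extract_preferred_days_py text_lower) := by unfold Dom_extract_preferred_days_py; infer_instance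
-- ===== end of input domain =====

-- B replaces A's 56 pattern-substring scans by one left-to-right scan of the text itself,
-- recognising a day token at each position by a dict lookup of the 3-char window and extending
-- it to a range when "-<day>" follows (objective: alternative; full names need no pass of their
-- own since each starts with its abbreviation).

-- ===== PORT A =====
-- shared module constants _BASE_DAYS / _DAY_CODE / _FULL_NAME_TO_BASE
def pvBaseDays : List String := ["mon", "tue", "wed", "thu", "fri", "sat", "sun"]
def pvDayCode : PySem.Dict String String := PySem.Dict.ofList
  [("mon", "MON"), ("tue", "TUE"), ("wed", "WED"), ("thu", "THU"),
   ("fri", "FRI"), ("sat", "SAT"), ("sun", "SUN")]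
def pvFullNames : List (String × String) :=
  [("monday", "mon"), ("tuesday", "tue"), ("wednesday", "wed"), ("thursday", "thu"),
   ("friday", "fri"), ("saturday", "sat"), ("sunday", "sun")]

-- _DAY_CODE[base] / _BASE_DAYS[k]: every key/index used is present, so the defaulted lookups are exact.
def extract_preferred_days_py (text_lower : String) : List String :=
  let normalized :=
    PySem.Str.replace (PySem.Str.replace (PySem.Str.replace text_lower "–" "-") "—" "-") " to " "-"
  -- 1) ranges "tue-thu"
  let found : PySem.Set String :=
    (PySem.List.enumerate pvBaseDays).foldl (fun s p =>
      (PySem.List.enumerate pvBaseDays).foldl (fun s q =>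
        if p.1 > q.1 then s
        else
          if PySem.Str.isIn (p.2 ++ "-" ++ q.2) normalized then
            (PySem.List.pyRange p.1 (q.1 + 1) 1).foldl (fun s k =>
              PySem.Set.add s (PySem.Dict.getD pvDayCode (PySem.List.pyGetD pvBaseDays k "") "")) s
          else s) s) PySem.Set.empty
  -- 2) full names
  let found := pvFullNames.foldl (fun s fb =>
      if PySem.Str.isIn fb.1 normalized then
        PySem.Set.add s (PySem.Dict.getD pvDayCode fb.2 "") else s) found
  -- 3) abbreviations
  let found := pvBaseDays.foldl (fun s base =>
      if PySem.Str.isIn base normalized then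
        PySem.Set.add s (PySem.Dict.getD pvDayCode base "") else s) found
  if found.isEmpty then [] else PySem.List.sorted found (fun x => x) false

-- ===== PORT B =====
-- _BASE_INDEX = {b: i for i, b in enumerate(_BASE_DAYS)}
def pvBaseIndex : PySem.Dict String Int :=
  PySem.Dict.ofList ((PySem.List.enumerate pvBaseDays).map (fun p => (p.2, p.1)))

-- one scan over positions p; normalized[p+3] is only read under the guard p+7 <= n, so it is in range
def extract_preferred_days_py_alt (text_lower : String) : List String :=
  let normalized :=
    PySem.Str.replace (PySem.Str.replace (PySem.Str.replace text_lower "–" "-") "—" "-") " to " "-"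
  let n : Int := PySem.Str.len normalized
  let found : PySem.Set String :=
    (PySem.List.pyRange 0 n 1).foldl (fun s p =>
      match PySem.Dict.get? pvBaseIndex (PySem.Str.slice normalized (some p) (some (p + 3))) with
      | none => s
      | some i =>
        let s := PySem.Set.add s (PySem.Dict.getD pvDayCode (PySem.List.pyGetD pvBaseDays i "") "")
        if p + 7 ≤ n ∧ PySem.Str.pyGet? normalized (p + 3) = some '-' then
          match PySem.Dict.get? pvBaseIndex (PySem.Str.slice normalized (some (p + 4)) (some (p + 7))) with
          | none => s
          | some j =>
            if i ≤ j then
              (PySem.List.pyRange i (j + 1) 1).foldl (fun s k =>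
                PySem.Set.add s (PySem.Dict.getD pvDayCode (PySem.List.pyGetD pvBaseDays k "") "")) s
            else s
        else s) PySem.Set.empty
  PySem.List.sorted found (fun x => x) false

-- ===== PRECONDITION & SPEC =====
def Spec_extract_preferred_days_py (text_lower : String) (out : List String) : Prop := out = extract_preferred_days_py_alt text_lower
instance (text_lower : String) (out : List String) : Decidable (Spec_extract_preferred_days_py text_lower out) := by unfold Spec_extract_preferred_days_py; infer_instance

-- ===== CLAIM (what is proved, stated in full; the proofs are below) =====
def Claim_equal_extract_preferred_days_py : Prop := ∀ (text_lower : String), Dom_extract_preferred_days_py text_lower → Spec_extract_preferred_days_py text_lower (extract_preferred_days_py text_lower)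

-- ===== LEMMAS AND PROOFS =====

-- proof-side names for the shared normalization, the day-code of index k, and the two found-sets
def pvNorm (t : String) : String :=
  PySem.Str.replace (PySem.Str.replace (PySem.Str.replace t "–" "-") "—" "-") " to "  "-"

def pvCode (k : Int) : String :=
  PySem.Dict.getD pvDayCode (PySem.List.pyGetD pvBaseDays k "") ""

def pvCodeS (b : String) : String := PySem.Dict.getD pvDayCode b ""

def pvFoundA (N : String) : PySem.Set String :=
  let f1 :=
    (PySem.List.enumerate pvBaseDays).foldl (fun s p =>
      (PySem.List.enumerate pvBaseDays).foldl (fun s q =>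
        if p.1 > q.1 then s
        else
          if PySem.Str.isIn (p.2 ++ "-" ++ q.2) N then
            (PySem.List.pyRange p.1 (q.1 + 1) 1).foldl (fun s k =>
              PySem.Set.add s (pvCode k)) s
          else s) s) PySem.Set.empty
  let f2 := pvFullNames.foldl (fun s fb =>
      if PySem.Str.isIn fb.1 N then PySem.Set.add s (pvCodeS fb.2) else s) f1
  pvBaseDays.foldl (fun s base =>
      if PySem.Str.isIn base N then PySem.Set.add s (pvCodeS base) else s) f2

def pvFoundB (N : String) : PySem.Set String :=
  (PySem.List.pyRange 0 (PySem.Str.len N) 1).foldl (fun s p =>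
    match PySem.Dict.get? pvBaseIndex (PySem.Str.slice N (some p) (some (p + 3))) with
    | none => s
    | some i =>
      let s := PySem.Set.add s (pvCode i)
      if p + 7 ≤ PySem.Str.len N ∧ PySem.Str.pyGet? N (p + 3) = some '-' then
        match PySem.Dict.get? pvBaseIndex (PySem.Str.slice N (some (p + 4)) (some (p + 7))) with
        | none => s
        | some j =>
          if i ≤ j then
            (PySem.List.pyRange i (j + 1) 1).foldl (fun s k => PySem.Set.add s (pvCode k)) s
          else s
      else s) PySem.Set.empty

theorem pvA_eq (t : String) :
    extract_preferred_days_py t =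
      (if (pvFoundA (pvNorm t)).isEmpty then []
       else PySem.List.sorted (pvFoundA (pvNorm t)) (fun x => x) false) := rfl

theorem pvB_eq (t : String) :
    extract_preferred_days_py_alt t =
      PySem.List.sorted (pvFoundB (pvNorm t)) (fun x => x) false := rfl

-- generic membership / nodup transport through a fold
theorem pv_mem_foldl {α : Type} (l : List α) (step : PySem.Set String → α → PySem.Set String)
    (C : α → String → Prop)
    (h : ∀ s p x, x ∈ step s p ↔ x ∈ s ∨ C p x) (s0 : PySem.Set String) (x : String) :
    x ∈ l.foldl step s0 ↔ x ∈ s0 ∨ ∃ p ∈ l, C p x := by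
  induction l generalizing s0 with
  | nil => simp
  | cons a l ih => simp only [List.foldl_cons, ih, h, List.mem_cons]; aesop

theorem pv_nodup_foldl {α : Type} (l : List α) (step : PySem.Set String → α → PySem.Set String)
    (h : ∀ s p, List.Nodup s → List.Nodup (step s p)) (s0 : PySem.Set String)
    (hs : s0.Nodup) : (l.foldl step s0).Nodup := by
  induction l generalizing s0 with
  | nil => exact hs
  | cons a l ih => exact ih _ (h _ _ hs)

theorem pv_nodup_foldl_add {α : Type} (l : List α) (f : α → String) (s0 : PySem.Set String)
    (hs : s0.Nodup) : (l.foldl (fun s k => PySem.Set.add s (f k)) s0).Nodup :=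
  pv_nodup_foldl l _ (fun _ _ h => PySem.Set.nodup_add _ _ h) s0 hs

-- the two found-sets' membership, as explicit conditions
def pvCA (N : String) (x : String) : Prop :=
  (∃ p ∈ PySem.List.enumerate pvBaseDays, ∃ q ∈ PySem.List.enumerate pvBaseDays,
      ¬ p.1 > q.1 ∧ PySem.Str.isIn (p.2 ++ "-" ++ q.2) N = true ∧
      ∃ k ∈ PySem.List.pyRange p.1 (q.1 + 1) 1, x = pvCode k)
  ∨ (∃ fb ∈ pvFullNames, PySem.Str.isIn fb.1 N = true ∧ x = pvCodeS fb.2)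
  ∨ (∃ b ∈ pvBaseDays, PySem.Str.isIn b N = true ∧ x = pvCodeS b)

def pvCB (N : String) (p : Int) (x : String) : Prop :=
  ∃ i, PySem.Dict.get? pvBaseIndex (PySem.Str.slice N (some p) (some (p + 3))) = some i ∧
    (x = pvCode i ∨
      (p + 7 ≤ PySem.Str.len N ∧ PySem.Str.pyGet? N (p + 3) = some '-' ∧
       ∃ j, PySem.Dict.get? pvBaseIndex (PySem.Str.slice N (some (p + 4)) (some (p + 7))) = some j ∧
         i ≤ j ∧ ∃ k ∈ PySem.List.pyRange i (j + 1) 1, x = pvCode k))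

theorem pv_mem_foundA (N x : String) : x ∈ pvFoundA N ↔ pvCA N x := by
  unfold pvFoundA pvCA
  rw [pv_mem_foldl _ _ (fun b x => PySem.Str.isIn b N = true ∧ x = pvCodeS b)
        (by intro s b x; cases h : PySem.Str.isIn b N <;> simp only [PySem.Str.isIn_eq] at h <;> simp [PySem.Set.mem_add, h]),
      pv_mem_foldl _ _ (fun fb x => PySem.Str.isIn fb.1 N = true ∧ x = pvCodeS fb.2)
        (by intro s fb x; cases h : PySem.Str.isIn fb.1 N <;> simp only [PySem.Str.isIn_eq] at h <;> simp [PySem.Set.mem_add, h]),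
      pv_mem_foldl _ _ (fun p x => ∃ q ∈ PySem.List.enumerate pvBaseDays,
          ¬ p.1 > q.1 ∧ PySem.Str.isIn (p.2 ++ "-" ++ q.2) N = true ∧
          ∃ k ∈ PySem.List.pyRange p.1 (q.1 + 1) 1, x = pvCode k)
        (by
          intro s p x
          rw [pv_mem_foldl _ _ (fun q x => ¬ p.1 > q.1 ∧ PySem.Str.isIn (p.2 ++ "-" ++ q.2) N = true ∧
                ∃ k ∈ PySem.List.pyRange p.1 (q.1 + 1) 1, x = pvCode k)
              (by
                intro s q x
                by_cases h1 : p.1 > q.1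
                · simp [h1]
                · cases h2 : PySem.Str.isIn (p.2 ++ "-" ++ q.2) N <;>
                    simp at h2 <;>
                    simp [PySem.Set.mem_foldl_add, h1, h2])])]
  simp [PySem.Set.empty, or_assoc]

theorem pv_mem_foundB (N x : String) :
    x ∈ pvFoundB N ↔ ∃ p ∈ PySem.List.pyRange 0 (PySem.Str.len N) 1, pvCB N p x := by
  unfold pvFoundB
  rw [pv_mem_foldl _ _ (pvCB N) ?_]
  · simp [PySem.Set.empty]
  intro s p x
  unfold pvCB
  cases hg : PySem.Dict.get? pvBaseIndex (PySem.Str.slice N (some p) (some (p + 3))) with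
  | none => simp
  | some i =>
    split_ifs with hguard
    · obtain ⟨hlen, hdash⟩ := hguard
      simp only [PySem.Str.len_eq, PySem.Str.pyGet?_eq] at hlen hdash
      cases hg2 : PySem.Dict.get? pvBaseIndex (PySem.Str.slice N (some (p + 4)) (some (p + 7))) with
      | none => simp [PySem.Set.mem_add]
      | some j =>
        by_cases hij : i ≤ j
        · simp [hij, PySem.Set.mem_foldl_add, PySem.Set.mem_add]
          tauto
        · simp [hij, PySem.Set.mem_add]
    · simp only [PySem.Set.mem_add, Option.some.injEq, exists_eq_left']
      tauto

theorem pv_nodup_foundA (N : String) : (pvFoundA N).Nodup := by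
  unfold pvFoundA
  refine pv_nodup_foldl _ _ ?_ _ (pv_nodup_foldl _ _ ?_ _ (pv_nodup_foldl _ _ ?_ _ List.nodup_nil))
  · intro s b hs; split_ifs
    · exact PySem.Set.nodup_add _ _ hs
    · exact hs
  · intro s fb hs; split_ifs
    · exact PySem.Set.nodup_add _ _ hs
    · exact hs
  · intro s p hs
    refine pv_nodup_foldl _ _ ?_ _ hs
    intro s q hs; split_ifs
    · exact hs
    · exact pv_nodup_foldl_add _ _ _ hs
    · exact hs

theorem pv_nodup_foundB (N : String) : (pvFoundB N).Nodup := by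
  unfold pvFoundB
  refine pv_nodup_foldl _ _ ?_ _ List.nodup_nil
  intro s p hs
  split
  · exact hs
  · split_ifs
    · split
      · exact PySem.Set.nodup_add _ _ hs
      · split_ifs
        · exact pv_nodup_foldl_add _ _ _ (PySem.Set.nodup_add _ _ hs)
        · exact PySem.Set.nodup_add _ _ hs
    · exact PySem.Set.nodup_add _ _ hs


-- lookup in _BASE_INDEX, characterised both ways
theorem pv_K1a (t : String) (i : Int) (h : PySem.Dict.get? pvBaseIndex t = some i) :
    ∃ k : Nat, k < 7 ∧ t = pvBaseDays.getD k "" ∧ i = (k : Int) := by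
  have h2 : pvBaseIndex.items = [("mon",(0:Int)),("tue",1),("wed",2),("thu",3),("fri",4),("sat",5),("sun",6)] := by rfl
  simp [PySem.Dict.get?, h2, List.find?] at h
  obtain ⟨a, h⟩ := h
  repeat' split at h
  all_goals simp_all [pvBaseDays]
  all_goals try obtain ⟨rfl, rfl⟩ := h
  all_goals first
    | exact ⟨0, by omega, rfl, by norm_num⟩
    | exact ⟨1, by omega, rfl, by norm_num⟩
    | exact ⟨2, by omega, rfl, by norm_num⟩
    | exact ⟨3, by omega, rfl, by norm_num⟩
    | exact ⟨4, by omega, rfl, by norm_num⟩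
    | exact ⟨5, by omega, rfl, by norm_num⟩
    | exact ⟨6, by omega, rfl, by norm_num⟩

theorem pv_K1b (k : Nat) (hk : k < 7) :
    PySem.Dict.get? pvBaseIndex (pvBaseDays.getD k "") = some (k : Int) := by
  interval_cases k <;> decide

-- a 3-character slice equals a 3-character string iff that string is a prefix there
theorem pv_K2 (N b : String) (p : Nat) (hb : b.toList.length = 3) :
    PySem.Str.slice N (some (p : Int)) (some ((p : Int) + 3)) = b ↔ b.toList <+: N.toList.drop p := by
  rw [String.ext_iff]
  have h3 : ((p : Int) + 3) = ((p : Int) + ((3 : Nat) : Int)) := by norm_num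
  simp only [PySem.Str.toList_slice, PySem.Chars.slice_eq_listSlice, h3,
    PySem.List.slice_natCast_add]
  rw [List.prefix_iff_eq_take, hb, eq_comm]

theorem pv_append_prefix (u r d : List Char) :
    u ++ r <+: d ↔ u <+: d ∧ r <+: d.drop u.length := by
  constructor
  · rintro ⟨t, rfl⟩
    exact ⟨⟨r ++ t, by simp⟩, ⟨t, by simp⟩⟩
  · rintro ⟨⟨w, rfl⟩, hr⟩
    rw [List.drop_left] at hr
    rcases hr with ⟨t, rfl⟩
    exact ⟨t, by simp⟩

theorem pv_dash_prefix (e : List Char) : ['-'] <+: e ↔ e[0]? = some '-' := by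
  cases e <;> simp [List.cons_prefix_iff]

-- a range pattern "xxx-yyy" sits at position p iff its three pieces sit at p, p+3, p+4
theorem pv_K3 (u v : String) (cs : List Char) (p : Nat) (hu : u.toList.length = 3) :
    ((u ++ "-" ++ v).toList <+: cs.drop p) ↔
      (u.toList <+: cs.drop p ∧ cs[p + 3]? = some '-' ∧ v.toList <+: cs.drop (p + 4)) := by
  have h1 : (u ++ "-" ++ v).toList = (u.toList ++ ['-']) ++ v.toList := by simp
  rw [h1, pv_append_prefix, pv_append_prefix, pv_dash_prefix]
  have h2 : (u.toList ++ ['-']).length = 4 := by simp [hu]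
  rw [h2, hu, List.drop_drop, List.drop_drop, List.getElem?_drop]
  constructor
  · rintro ⟨⟨ha, hb⟩, hc⟩
    exact ⟨ha, by simpa using hb, by simpa using hc⟩
  · rintro ⟨ha, hb, hc⟩
    exact ⟨⟨ha, by simpa using hb⟩, by simpa using hc⟩

theorem pv_prefix_len {b cs : List Char} {p : Nat} (h : b <+: cs.drop p) (hb : b.length = 3) :
    p + 3 ≤ cs.length := by
  have := h.length_le
  rw [List.length_drop, hb] at this
  omega

theorem pv_K4 (b N : String) :
    PySem.Str.isIn b N = true ↔ ∃ p : Nat, b.toList <+: N.toList.drop p := by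
  rw [PySem.Str.isIn_eq, ← PySem.Chars.exists_prefix_drop_iff_isIn]

theorem pv_K5 (N : String) (p : Nat) : PySem.Str.pyGet? N ((p : Int) + 3) = N.toList[p + 3]? := by
  have : ((p : Int) + 3) = (((p + 3 : Nat)) : Int) := by push_cast; ring
  rw [this, PySem.Str.pyGet?_natCast]

-- decidable facts about the seven day constants
theorem pv_base_len : ∀ b ∈ pvBaseDays, b.toList.length = 3 := by decide

theorem pv_base_all : ∀ k ∈ List.range 7,
    (pvBaseDays.getD k "").toList.length = 3 ∧ pvBaseDays.getD k "" ∈ pvBaseDays ∧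
      pvCodeS (pvBaseDays.getD k "") = pvCode (k : Int) := by decide

theorem pv_base_mem : ∀ b ∈ pvBaseDays, ∃ k ∈ List.range 7, b = pvBaseDays.getD k "" := by decide

theorem pv_full_decomp : ∀ fb ∈ pvFullNames,
    fb.1.toList = fb.2.toList ++ fb.1.toList.drop 3 ∧ ∃ k ∈ List.range 7, fb.2 = pvBaseDays.getD k "" := by decide

theorem pv_single (N x : String) (k : Nat) (hk : k < 7) (pos : Nat)
    (hpre : (pvBaseDays.getD k "").toList <+: N.toList.drop pos)
    (hx : x = pvCode (k : Int)) :
    ∃ p ∈ PySem.List.pyRange 0 (PySem.Str.len N) 1, pvCB N p x := by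
  have hlen3 : (pvBaseDays.getD k "").toList.length = 3 := (pv_base_all k (by simpa using hk)).1
  have hposlt : pos + 3 ≤ N.toList.length := pv_prefix_len hpre hlen3
  have hslice : PySem.Str.slice N (some (pos : Int)) (some ((pos : Int) + 3)) = pvBaseDays.getD k "" :=
    (pv_K2 N _ pos hlen3).mpr hpre
  refine ⟨(pos : Int), ?_, (k : Int), ?_, Or.inl hx⟩
  · rw [PySem.List.mem_pyRange_one]
    simp only [PySem.Str.len_eq]
    exact ⟨Int.natCast_nonneg _, by exact_mod_cast (show pos < N.toList.length by omega)⟩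
  · rw [hslice]
    exact pv_K1b k hk

theorem pv_CA_iff_CB (N x : String) :
    pvCA N x ↔ ∃ p ∈ PySem.List.pyRange 0 (PySem.Str.len N) 1, pvCB N p x := by
  constructor
  · intro h
    rcases h with ⟨pp, hpp, qq, hqq, hle, hisin, k, hk, hx⟩ | ⟨fb, hfb, hisin, hx⟩ | ⟨b, hb, hisin, hx⟩
    · rcases (PySem.List.mem_enumerate_iff _ _ _).mp hpp with ⟨ia, hia, rfl⟩
      rcases (PySem.List.mem_enumerate_iff _ _ _).mp hqq with ⟨ja, hja, rfl⟩
      have h7 : pvBaseDays.length = 7 := rfl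
      rcases (pv_K4 _ N).mp hisin with ⟨pos, hpre⟩
      have hb3 : (pvBaseDays[ia]).toList.length = 3 := pv_base_len _ (List.getElem_mem _)
      have hb3' : (pvBaseDays[ja]).toList.length = 3 := pv_base_len _ (List.getElem_mem _)
      rw [pv_K3 _ _ _ _ hb3] at hpre
      obtain ⟨h1, h2, h3⟩ := hpre
      have hgd1 : pvBaseDays[ia] = pvBaseDays.getD ia "" := (List.getD_eq_getElem _ _ _).symm
      have hgd2 : pvBaseDays[ja] = pvBaseDays.getD ja "" := (List.getD_eq_getElem _ _ _).symm
      rw [hgd1] at h1 hb3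
      rw [hgd2] at h3 hb3'
      have hpos3 : pos + 3 ≤ N.toList.length := pv_prefix_len h1 hb3
      have hpos7 : pos + 7 ≤ N.toList.length := by
        have := pv_prefix_len h3 hb3'
        omega
      simp only [zero_add] at hle hk
      refine ⟨(pos : Int), ?_, (ia : Int), ?_, Or.inr ⟨?_, ?_, (ja : Int), ?_, ?_, k, hk, hx⟩⟩
      · rw [PySem.List.mem_pyRange_one]
        simp only [PySem.Str.len_eq]
        exact ⟨Int.natCast_nonneg _, by exact_mod_cast (show pos < N.toList.length by omega)⟩
      · rw [(pv_K2 N _ pos hb3).mpr h1]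
        exact pv_K1b ia (by omega)
      · simp only [PySem.Str.len_eq]
        exact_mod_cast (show pos + 7 ≤ N.toList.length from hpos7)
      · rw [pv_K5]
        exact h2
      · rw [show ((pos : Int) + 4) = (((pos + 4 : Nat)) : Int) by push_cast; ring,
            show ((pos : Int) + 7) = (((pos + 4 : Nat)) : Int) + 3 by push_cast; ring,
            (pv_K2 N _ (pos + 4) hb3').mpr h3]
        exact pv_K1b ja (by omega)
      · omega
    · obtain ⟨hdec, k, hkr, hfb2⟩ := pv_full_decomp fb hfb
      have hk7 : k < 7 := by simpa using hkr
      rcases (pv_K4 _ N).mp hisin with ⟨pos, hpre⟩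
      have hbase : (pvBaseDays.getD k "").toList <+: N.toList.drop pos :=
        List.IsPrefix.trans ⟨fb.1.toList.drop 3, by rw [← hfb2]; exact hdec.symm⟩ hpre
      refine pv_single N x k hk7 pos hbase ?_
      rw [hx, hfb2]
      exact (pv_base_all k hkr).2.2
    · obtain ⟨k, hkr, rfl⟩ := pv_base_mem b hb
      have hk7 : k < 7 := by simpa using hkr
      rcases (pv_K4 _ N).mp hisin with ⟨pos, hpre⟩
      refine pv_single N x k hk7 pos hpre ?_
      rw [hx]
      exact (pv_base_all k hkr).2.2
  · rintro ⟨p, hp, i, hget, hbr⟩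
    rw [PySem.List.mem_pyRange_one] at hp
    simp only [PySem.Str.len_eq] at hp
    obtain ⟨hp0, hplt⟩ := hp
    obtain ⟨pn, rfl⟩ : ∃ pn : Nat, p = (pn : Int) := ⟨p.toNat, (Int.toNat_of_nonneg hp0).symm⟩
    obtain ⟨k, hk7, hslice, rfl⟩ := pv_K1a _ _ hget
    have hb3 : (pvBaseDays.getD k "").toList.length = 3 := (pv_base_all k (by simpa using hk7)).1
    have hpre : (pvBaseDays.getD k "").toList <+: N.toList.drop pn := (pv_K2 N _ pn hb3).mp hslice
    rcases hbr with hx | ⟨hlen, hdash, j, hget2, hij, k2, hk2, hx⟩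
    · refine Or.inr (Or.inr ⟨pvBaseDays.getD k "", (pv_base_all k (by simpa using hk7)).2.1, ?_, ?_⟩)
      · exact (pv_K4 _ N).mpr ⟨pn, hpre⟩
      · rw [hx]
        exact ((pv_base_all k (by simpa using hk7)).2.2).symm
    · obtain ⟨k2', hk2'7, hslice2, rfl⟩ := pv_K1a _ _ hget2
      rw [show ((pn : Int) + 4) = (((pn + 4 : Nat)) : Int) by push_cast; ring,
          show ((pn : Int) + 7) = (((pn + 4 : Nat)) : Int) + 3 by push_cast; ring] at hslice2
      have hb3' : (pvBaseDays.getD k2' "").toList.length = 3 := (pv_base_all k2' (by simpa using hk2'7)).1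
      have hpre2 : (pvBaseDays.getD k2' "").toList <+: N.toList.drop (pn + 4) :=
        (pv_K2 N _ (pn + 4) hb3').mp hslice2
      rw [pv_K5] at hdash
      refine Or.inl ⟨((k : Int), pvBaseDays.getD k ""), ?_, ((k2' : Int), pvBaseDays.getD k2' ""), ?_, ?_, ?_, k2, ?_, hx⟩
      · rw [PySem.List.mem_enumerate_iff _ _ _]
        exact ⟨k, by simpa using hk7, by simp [List.getElem?_eq_getElem (show k < pvBaseDays.length by simpa using hk7)]; rfl⟩
      · rw [PySem.List.mem_enumerate_iff _ _ _]
        exact ⟨k2', by simpa using hk2'7, by simp [List.getElem?_eq_getElem (show k2' < pvBaseDays.length by simpa using hk2'7)]; rfl⟩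
      · simp only [not_lt]
        exact hij
      · rw [pv_K4]
        refine ⟨pn, ?_⟩
        rw [pv_K3 _ _ _ _ hb3]
        exact ⟨hpre, hdash, hpre2⟩
      · simpa using hk2

theorem pv_main (t : String) :
    extract_preferred_days_py t = extract_preferred_days_py_alt t := by
  rw [pvA_eq, pvB_eq]
  have hperm : (pvFoundA (pvNorm t)).Perm (pvFoundB (pvNorm t)) :=
    (List.perm_ext_iff_of_nodup (pv_nodup_foundA _) (pv_nodup_foundB _)).mpr
      (fun x => by rw [pv_mem_foundA, pv_mem_foundB, pv_CA_iff_CB])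
  by_cases h : (pvFoundA (pvNorm t)).isEmpty
  · have hA : pvFoundA (pvNorm t) = [] := List.isEmpty_iff.mp h
    have hB : pvFoundB (pvNorm t) = [] := by
      have := hperm; rw [hA] at this; exact (List.Perm.nil_eq this).symm
    rw [if_pos h, hB]; rfl
  · rw [if_neg h]
    exact PySem.List.sorted_eq_sorted_of_perm _ _ _ (fun a b hab => hab) hperm

-- ===== VERDICT (by name: the statement is the Claim_ definition above) =====
theorem extract_preferred_days_py_spec : Claim_equal_extract_preferred_days_py := by
  intro t _
  exact pv_main t
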